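-- pv_equiv track=rewrite | github.com/RylandGomez/CS-Arcade | Intro/3_Smooth_Sailing/10_commonCharacterCount.py | solution
-- ===== SOURCE A (Python) =====
-- def solution(s1, s2):
--     '''
--     EXPLANATION
--     -------------------------------------------------------------------
--     I approached this problem by creating two dictionaries, one for
--     each string. These dictionaries are formatted with characters as
--     keys, and counts as values. I then iterate over each string,
--     counting the instances of each character.
--     Finally, I iterate over the first dictionary, and if that character
--     exists in the second dictionary, I add the lesser of the two values
--     to create a total count of shared characters.
--     -------------------------------------------------------------------
--     '''
--
--     s1_dict = {}
--     s2_dict = {}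
--     count = 0
--     for letter in s1:
--         s1_dict[letter] = s1.count(letter)
--         s1.replace(letter, "")
--     for letter in s2:
--         s2_dict[letter] = s2.count(letter)
--         s2.replace(letter, "")
--     for letter in s1_dict:
--         if letter in s2_dict:
--             if s1_dict[letter] > s2_dict[letter]:
--                 count += s2_dict[letter]
--             else:
--                 count += s1_dict[letter]
--     return count
-- ===== SOURCE B (Python) =====
-- def solution(s1, s2):
--     a = sorted(s1)
--     b = sorted(s2)
--     i = j = count = 0
--     while i < len(a) and j < len(b):
--         if a[i] == b[j]:
--             count += 1
--             i += 1
--             j += 1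
--         elif a[i] < b[j]:
--             i += 1
--         else:
--             j += 1
--     return count
-- ===== Notes on version B (the rewrite author's own statement) =====
-- stated objective: faster
-- what changed: Replaced the dict-of-counts build (which calls s.count(letter) for every character, quadratic) by sort-then-two-pointer merge over the two sorted strings, counting each shared occurrence directly.
import Mathlib
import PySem

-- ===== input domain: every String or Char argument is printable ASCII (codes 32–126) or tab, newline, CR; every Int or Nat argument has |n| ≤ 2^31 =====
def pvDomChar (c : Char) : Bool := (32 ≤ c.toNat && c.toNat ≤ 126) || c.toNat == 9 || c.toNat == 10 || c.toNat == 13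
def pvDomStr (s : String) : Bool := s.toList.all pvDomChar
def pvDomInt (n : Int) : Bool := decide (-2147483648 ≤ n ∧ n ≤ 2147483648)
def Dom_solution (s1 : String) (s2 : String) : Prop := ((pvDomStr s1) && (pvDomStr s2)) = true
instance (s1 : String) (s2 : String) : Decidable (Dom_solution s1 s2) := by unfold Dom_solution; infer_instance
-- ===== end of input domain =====

-- B replaces A's quadratic dict-of-counts build with sort + two-pointer merge (measured faster at the large sizes).

-- ===== PORT A =====
-- A's first two loops: `d[letter] = s.count(letter)` for each letter of s (the discarded
-- pure expression `s.replace(letter, "")` has no effect and is omitted; `s.count(letter)`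
-- for a single character is exactly List.count on the code points).
def pvBuildCount (s : List Char) : PySem.Dict Char Int :=
  s.foldl (fun d c => d.insert c ((s.count c : Int))) PySem.Dict.empty

def solution (s1 : String) (s2 : String) : Int :=
  let d1 := pvBuildCount s1.toList
  let d2 := pvBuildCount s2.toList
  -- A's third loop: `for letter in s1_dict: ...`
  d1.keys.foldl (fun count c =>
    if d2.contains c then
      if d1.getD c 0 > d2.getD c 0 then count + d2.getD c 0 else count + d1.getD c 0
    else count) 0

-- ===== PORT B =====
-- B's while loop over the two sorted character lists, as structural recursion.
def pvMerge : List Char → List Char → Int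
  | [], _ => 0
  | _ :: _, [] => 0
  | a :: l1, b :: l2 =>
    if a = b then 1 + pvMerge l1 l2
    else if a < b then pvMerge l1 (b :: l2)
    else pvMerge (a :: l1) l2
termination_by l1 l2 => l1.length + l2.length

def solution_alt (s1 : String) (s2 : String) : Int :=
  pvMerge (PySem.List.sorted s1.toList (fun x => x) false)
          (PySem.List.sorted s2.toList (fun x => x) false)

-- ===== PRECONDITION & SPEC =====
def Spec_solution (s1 : String) (s2 : String) (out : Int) : Prop := out = solution_alt s1 s2
instance (s1 : String) (s2 : String) (out : Int) : Decidable (Spec_solution s1 s2 out) := by unfold Spec_solution; infer_instance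

-- ===== CLAIM (what is proved, stated in full; the proofs are below) =====
def Claim_equal_solution : Prop := ∀ (s1 : String) (s2 : String), Dom_solution s1 s2 → Spec_solution s1 s2 (solution s1 s2)

-- ===== LEMMAS AND PROOFS =====

-- lookup in A's dict: last insert wins, and every insert of c carries the same value f c
theorem pv_getD_foldl_insert_const (f : Char → Int) (l : List Char) (d : PySem.Dict Char Int) (c : Char) :
    (l.foldl (fun d x => d.insert x (f x)) d).getD c 0 = if c ∈ l then f c else d.getD c 0 := by
  induction l using List.reverseRecOn generalizing d with
  | nil => simp
  | append_singleton l x ih =>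
      rw [List.foldl_append]
      simp only [List.foldl_cons, List.foldl_nil, PySem.Dict.getD_insert, ih, List.mem_append,
        List.mem_singleton]
      by_cases hx : c = x <;> by_cases hm : c ∈ l <;> simp [hx, hm]

theorem pv_getD_build (s : List Char) (c : Char) :
    (pvBuildCount s).getD c 0 = if c ∈ s then (s.count c : Int) else 0 := by
  rw [pvBuildCount, pv_getD_foldl_insert_const]
  simp

theorem pv_keys_build (s : List Char) : (pvBuildCount s).keys = PySem.Set.ofList s := by
  rw [pvBuildCount, PySem.Dict.keys_foldl_insert]
  simp [PySem.Set.update, PySem.Set.ofList_eq_foldl, PySem.Dict.keys_empty]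

-- A computes the sum over the distinct characters of s1 of min(count1, count2)
theorem pv_A_eq_sum (l1 l2 : List Char) :
    (pvBuildCount l1).keys.foldl (fun count c =>
      if (pvBuildCount l2).contains c then
        if (pvBuildCount l1).getD c 0 > (pvBuildCount l2).getD c 0 then
          count + (pvBuildCount l2).getD c 0
        else count + (pvBuildCount l1).getD c 0
      else count) 0
    = ((PySem.Set.ofList l1).map (fun c => (min (l1.count c) (l2.count c) : Int))).sum := by
  rw [pv_keys_build]
  rw [PySem.List.foldl_congr_mem (g := fun count c => count + (min (l1.count c) (l2.count c) : Int))]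
  · rw [PySem.List.foldl_add]; simp
  · intro acc c hc
    have hc1 : c ∈ l1 := (PySem.Set.mem_ofList _ _).mp hc
    rw [PySem.Dict.contains_eq_decide_mem_keys, pv_keys_build]
    by_cases h2 : c ∈ l2
    · simp only [pv_getD_build, if_pos hc1, PySem.Set.mem_ofList, h2, decide_true, if_true]
      split_ifs with hgt <;> omega
    · have hz : l2.count c = 0 := List.count_eq_zero.mpr h2
      simp [PySem.Set.mem_ofList, h2, hz]

-- that sum is the cardinality of the multiset intersection
theorem pv_sum_eq_card (l1 l2 : List Char) :
    ((PySem.Set.ofList l1).map (fun c => (min (l1.count c) (l2.count c) : Int))).sum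
    = (((l1 : Multiset Char) ∩ (l2 : Multiset Char)).card : Int) := by
  have hnd : (PySem.Set.ofList l1).Nodup := PySem.Set.nodup_ofList l1
  have hfs : (PySem.Set.ofList l1).toFinset = l1.toFinset := by
    apply Finset.ext; intro c
    simp [List.mem_toFinset, PySem.Set.mem_ofList]
  rw [← List.sum_toFinset _ hnd, hfs]
  have hsub : ((l1 : Multiset Char) ∩ (l2 : Multiset Char)).toFinset ⊆ l1.toFinset := by
    intro c hc
    rw [Multiset.mem_toFinset, Multiset.mem_inter] at hc
    exact List.mem_toFinset.mpr hc.1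
  have h : ∑ c ∈ l1.toFinset, min (l1.count c) (l2.count c)
      = ((l1 : Multiset Char) ∩ (l2 : Multiset Char)).card := by
    calc ∑ c ∈ l1.toFinset, min (l1.count c) (l2.count c)
        = ∑ c ∈ l1.toFinset, ((l1 : Multiset Char) ∩ (l2 : Multiset Char)).count c := by
          refine Finset.sum_congr rfl fun c _ => ?_
          simp
      _ = ∑ c ∈ ((l1 : Multiset Char) ∩ (l2 : Multiset Char)).toFinset,
            ((l1 : Multiset Char) ∩ (l2 : Multiset Char)).count c := by
          refine (Finset.sum_subset hsub fun c _ hc => ?_).symm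
          exact Multiset.count_eq_zero.mpr (by simpa [Multiset.mem_toFinset] using hc)
      _ = ((l1 : Multiset Char) ∩ (l2 : Multiset Char)).card :=
          Multiset.toFinset_sum_count_eq _
  rw [← h]
  push_cast
  rfl

-- B's merge on two sorted lists counts the multiset intersection
theorem pv_merge_eq_card : ∀ (l1 l2 : List Char), l1.Pairwise (· ≤ ·) → l2.Pairwise (· ≤ ·) →
    pvMerge l1 l2 = (((l1 : Multiset Char) ∩ (l2 : Multiset Char)).card : Int) := by
  intro l1 l2
  induction l1, l2 using pvMerge.induct with
  | case1 l2 => intro _ _; simp [pvMerge]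
  | case2 a l1 => intro _ _; simp [pvMerge]
  | case3 l1 b l2 ih =>
      intro h1 h2
      rw [pvMerge, if_pos rfl]
      have hm : ((b :: l1 : List Char) : Multiset Char) ∩ ((b :: l2 : List Char) : Multiset Char)
          = b ::ₘ (((l1 : List Char) : Multiset Char) ∩ ((l2 : List Char) : Multiset Char)) := by
        rw [← Multiset.cons_coe, ← Multiset.cons_coe,
          Multiset.cons_inter_of_pos _ (Multiset.mem_cons_self b _), Multiset.erase_cons_head]
      rw [hm, ih h1.of_cons h2.of_cons]
      simp only [Multiset.card_cons]
      omega
  | case4 a l1 b l2 hab hlt ih =>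
      intro h1 h2
      rw [pvMerge, if_neg hab, if_pos hlt]
      have hnotin : a ∉ ((b :: l2 : List Char) : Multiset Char) := by
        simp only [Multiset.mem_coe, List.mem_cons]
        rintro (rfl | hmem)
        · exact hab rfl
        · exact absurd hlt (not_lt.mpr ((List.pairwise_cons.mp h2).1 _ hmem))
      have hm : ((a :: l1 : List Char) : Multiset Char) ∩ ((b :: l2 : List Char) : Multiset Char)
          = ((l1 : List Char) : Multiset Char) ∩ ((b :: l2 : List Char) : Multiset Char) := by
        rw [← Multiset.cons_coe (a := a), Multiset.cons_inter_of_neg _ hnotin]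
      rw [hm]
      exact ih h1.of_cons h2
  | case5 a l1 b l2 hab hnlt ih =>
      intro h1 h2
      rw [pvMerge, if_neg hab, if_neg hnlt]
      have hblt : b < a := lt_of_le_of_ne (not_lt.mp hnlt) (fun h => hab h.symm)
      have hnotin : b ∉ ((a :: l1 : List Char) : Multiset Char) := by
        simp only [Multiset.mem_coe, List.mem_cons]
        rintro (rfl | hmem)
        · exact absurd hblt (lt_irrefl _)
        · exact absurd ((List.pairwise_cons.mp h1).1 _ hmem) (not_le.mpr hblt)
      have hm : ((a :: l1 : List Char) : Multiset Char) ∩ ((b :: l2 : List Char) : Multiset Char)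
          = ((a :: l1 : List Char) : Multiset Char) ∩ ((l2 : List Char) : Multiset Char) := by
        rw [← Multiset.cons_coe (a := b), Multiset.inter_comm,
          Multiset.cons_inter_of_neg _ hnotin, Multiset.inter_comm]
      rw [hm]
      exact ih h1 h2.of_cons

-- ===== VERDICT (by name: the statement is the Claim_ definition above) =====
theorem solution_spec : Claim_equal_solution := by
  intro s1 s2 _
  show solution s1 s2 = solution_alt s1 s2
  rw [solution, solution_alt]
  have hp1 := PySem.List.sorted_pairwise (xs := s1.toList) (key := fun x => x)
  have hp2 := PySem.List.sorted_pairwise (xs := s2.toList) (key := fun x => x)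
  rw [pv_merge_eq_card _ _ hp1 hp2]
  have e1 : ((PySem.List.sorted s1.toList (fun x => x) false : List Char) : Multiset Char)
      = (s1.toList : Multiset Char) := Multiset.coe_eq_coe.mpr (PySem.List.sorted_perm _ _ _)
  have e2 : ((PySem.List.sorted s2.toList (fun x => x) false : List Char) : Multiset Char)
      = (s2.toList : Multiset Char) := Multiset.coe_eq_coe.mpr (PySem.List.sorted_perm _ _ _)
  rw [e1, e2]
  exact (pv_A_eq_sum s1.toList s2.toList).trans (pv_sum_eq_card s1.toList s2.toList)
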